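-- pv_equiv track=rewrite | github.com/vinhthaitong/Spam-Classifications | data_prep.py | vectorize_tokens
-- ===== SOURCE A (Python) =====
-- from collections import Counter
-- from typing import Dict, Iterable, List, Sequence, Tuple
--
-- def vectorize_tokens(
--     tokens: Sequence[str],
--     vocab_index: Dict[str, int],
--     representation: str,
-- ) -> List[int]:
--     """Convert one tokenized email into a dense feature vector.
--
--     Supported representations:
--         - "bow": word counts (frequency).
--         - "bernoulli": binary presence (0/1).
--
--     Tokens not found in vocab_index are ignored.
--
--     Args:
--         tokens: Tokenized email.
--         vocab_index: Mapping token -> feature column index.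
--         representation: Conversion mode ("bow" or "bernoulli").
--
--     Returns:
--         List[int]: Dense feature vector aligned with vocabulary order.
--
--     Raises:
--         ValueError: If representation is not one of the supported modes.
--     """
--     vector = [0] * len(vocab_index)
--
--     if representation == "bow":
--         counts = Counter(tokens)
--         for token, count in counts.items():
--             idx = vocab_index.get(token)
--             if idx is not None:
--                 vector[idx] = count
--         return vector
--
--     if representation == "bernoulli":
--         for token in set(tokens):
--             idx = vocab_index.get(token)
--             if idx is not None:
--                 vector[idx] = 1
--         return vector
--
--     raise ValueError(f"Unknown representation: {representation}")
-- ===== SOURCE B (Python) =====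
-- from collections import Counter
--
--
-- def vectorize_tokens(tokens, vocab_index, representation):
--     """Column-driven: build one token->value table for the chosen mode, then
--     fill the vector by iterating the VOCABULARY (one lookup per column),
--     instead of streaming the tokens into the vector."""
--     if representation == "bow":
--         bag = Counter(tokens)
--     elif representation == "bernoulli":
--         bag = dict.fromkeys(tokens, 1)
--     else:
--         raise ValueError(f"Unknown representation: {representation}")
--     vector = [0] * len(vocab_index)
--     for token, idx in vocab_index.items():
--         if token in bag:
--             vector[idx] = bag[token]
--     return vector
-- ===== Notes on version B (the rewrite author's own statement) =====
-- stated objective: alternative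
-- what changed: B inverts the join direction: it builds one token->value table (counts for bow, presence for bernoulli) and then fills the vector by a single loop over the VOCABULARY entries looking each vocabulary token up in that table, instead of A's loops over the token-derived Counter/set that look each token up in the vocabulary.
-- outside the precondition, e.g. on vectorize_tokens(['b', 'a', 'b'], {'a': 0, 'b': 0}, 'bow'): A returns [1, 0], B returns [2, 0]
import Mathlib
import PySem

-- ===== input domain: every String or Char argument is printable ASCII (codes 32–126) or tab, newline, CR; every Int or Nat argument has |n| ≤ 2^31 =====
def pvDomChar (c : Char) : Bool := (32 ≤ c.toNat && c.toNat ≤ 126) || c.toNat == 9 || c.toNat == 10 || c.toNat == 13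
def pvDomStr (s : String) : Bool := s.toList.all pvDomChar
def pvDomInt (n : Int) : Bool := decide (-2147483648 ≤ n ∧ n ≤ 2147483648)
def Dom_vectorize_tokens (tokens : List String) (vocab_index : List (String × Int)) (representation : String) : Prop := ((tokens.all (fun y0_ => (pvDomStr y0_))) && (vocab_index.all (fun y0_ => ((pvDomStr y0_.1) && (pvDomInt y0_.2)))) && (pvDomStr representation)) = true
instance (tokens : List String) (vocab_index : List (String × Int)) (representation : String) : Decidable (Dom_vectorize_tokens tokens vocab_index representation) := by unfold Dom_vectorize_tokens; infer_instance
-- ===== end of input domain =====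

-- B inverts the join direction: a token->value table built once (counts / presence),
-- then ONE loop over the vocabulary entries filling the vector (objective: alternative).
-- Equivalence is about the return value; neither version mutates its arguments.

-- vocab_index.get(token): dict lookup (first match under the assoc-list convention)
def pvGetIdx (vocab_index : List (String × Int)) (t : String) : Option Int :=
  (PySem.Dict.mk vocab_index).get? t

-- ===== PORT A =====
def vectorize_tokens (tokens : List String) (vocab_index : List (String × Int)) (representation : String) : List Int :=
  let vector := List.replicate vocab_index.length (0 : Int)
  if representation = "bow" then
    -- counts = Counter(tokens); for token, count in counts.items(): …
    (PySem.Dict.counter tokens).items.foldl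
      (fun v tc =>
        match pvGetIdx vocab_index tc.1 with
        | some idx => PySem.List.pySetD v idx tc.2
        | none => v) vector
  else if representation = "bernoulli" then
    -- for token in set(tokens): … — the result does not depend on the set's
    -- iteration order (each found token writes the constant 1 to its own column)
    (PySem.Set.ofList tokens).foldl
      (fun v t =>
        match pvGetIdx vocab_index t with
        | some idx => PySem.List.pySetD v idx 1
        | none => v) vector
  else []  -- raise ValueError: excluded by Pre_

-- ===== PORT B =====
-- bag = dict.fromkeys(tokens, 1)
def pvFromKeys1 (tokens : List String) : PySem.Dict String Int :=
  tokens.foldl (fun d t => d.insert t 1) PySem.Dict.empty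

def vectorize_tokens_alt (tokens : List String) (vocab_index : List (String × Int)) (representation : String) : List Int :=
  if representation = "bow" ∨ representation = "bernoulli" then
    let bag : PySem.Dict String Int :=
      if representation = "bow" then PySem.Dict.counter tokens else pvFromKeys1 tokens
    let vector := List.replicate vocab_index.length (0 : Int)
    -- for token, idx in vocab_index.items(): the dict parameter IS its items list
    vocab_index.foldl
      (fun v ti =>
        match bag.get? ti.1 with
        | some c => PySem.List.pySetD v ti.2 c  -- if token in bag: vector[idx] = bag[token]
        | none => v) vector
  else []  -- raise ValueError: excluded by Pre_

-- ===== PRECONDITION & SPEC =====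
-- Python's effective (wrapped) list index, as a Nat, for -n ≤ i < n
def pvEffN (n : Nat) (i : Int) : Nat := (if i < 0 then i + (n : Int) else i).toNat

-- does the looked-up index of this token stay inside the vector (no IndexError)?
def pvInRangeTok (vocab_index : List (String × Int)) (t : String) : Bool :=
  (pvGetIdx vocab_index t).all fun i =>
    (-(vocab_index.length : Int) ≤ i && i < (vocab_index.length : Int))

-- do two tokens land on the same vector column?
def pvCollide (vocab_index : List (String × Int)) (t1 t2 : String) : Bool :=
  match pvGetIdx vocab_index t1, pvGetIdx vocab_index t2 with
  | some i, some j => pvEffN vocab_index.length i == pvEffN vocab_index.length j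
  | _, _ => false

-- Pre_ excludes (a) unknown representations (A raises ValueError), (b) tokens whose vocab
-- index falls outside the vector (A raises IndexError), (c) assoc lists with duplicate
-- keys, which do not represent any Python dict, and (d) for "bow" only, vocab maps that
-- send two distinct present tokens to the same column — a corner no caller would rely on,
-- where A's last-write-wins over the Counter order and B's vocab-order write are both defensible.
def Pre_vectorize_tokens (tokens : List String) (vocab_index : List (String × Int)) (representation : String) : Prop :=
  (representation = "bow" ∨ representation = "bernoulli") ∧
  (vocab_index.map Prod.fst).Nodup ∧
  (∀ t ∈ tokens, pvInRangeTok vocab_index t = true) ∧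
  (representation = "bow" →
    ∀ t1 ∈ tokens, ∀ t2 ∈ tokens, t1 ≠ t2 → pvCollide vocab_index t1 t2 = false)
instance (tokens : List String) (vocab_index : List (String × Int)) (representation : String) : Decidable (Pre_vectorize_tokens tokens vocab_index representation) := by unfold Pre_vectorize_tokens; infer_instance

def pvWitness_vectorize_tokens : List String × (List (String × Int)) × String :=
  (["spam", "ham", "spam"], [("spam", 0), ("ham", 1)], "bow")

def Spec_vectorize_tokens (tokens : List String) (vocab_index : List (String × Int)) (representation : String) (out : List Int) : Prop := out = vectorize_tokens_alt tokens vocab_index representation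
instance (tokens : List String) (vocab_index : List (String × Int)) (representation : String) (out : List Int) : Decidable (Spec_vectorize_tokens tokens vocab_index representation out) := by unfold Spec_vectorize_tokens; infer_instance

-- ===== CLAIM (what is proved, stated in full; the proofs are below) =====
def Claim_equal_vectorize_tokens : Prop := ∀ (tokens : List String) (vocab_index : List (String × Int)) (representation : String), Dom_vectorize_tokens tokens vocab_index representation → Pre_vectorize_tokens tokens vocab_index representation → Spec_vectorize_tokens tokens vocab_index representation (vectorize_tokens tokens vocab_index representation)

-- ===== LEMMAS AND PROOFS =====

-- does token t write into column j (A's loops)?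
def pvHit (vocab_index : List (String × Int)) (j : Nat) (t : String) : Bool :=
  match pvGetIdx vocab_index t with
  | some i => pvEffN vocab_index.length i == j
  | none => false

-- does vocab entry ti write into column j (B's loop, table bag, vector length n)?
def pvHitE (bag : PySem.Dict String Int) (n j : Nat) (ti : String × Int) : Bool :=
  (bag.get? ti.1).isSome && (pvEffN n ti.2 == j)

theorem pvEffN_lt (n : Nat) (i : Int) (h1 : -(n : Int) ≤ i) (h2 : i < n) :
    pvEffN n i < n := by
  unfold pvEffN; split <;> omega

-- vector[i] = c on an in-range (possibly negative) index is a set at the wrapped position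
theorem pySetD_eff (xs : List Int) (i : Int) (c : Int)
    (h1 : -(xs.length : Int) ≤ i) (h2 : i < xs.length) :
    PySem.List.pySetD xs i c = xs.set (pvEffN xs.length i) c := by
  by_cases h : 0 ≤ i
  · rw [PySem.List.pySetD_of_nonneg (h := h)]
    unfold pvEffN; rw [if_neg (by omega)]
  · unfold PySem.List.pySetD PySem.List.pySet? PySem.List.pyIdx?
    simp [pvEffN]
    rw [if_neg (by omega), if_pos (by omega), if_pos (by omega)]
    simp
    congr 1
    omega

theorem getD_set_int (v : List Int) (k j : Nat) (c : Int) (hk : k < v.length) :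
    (v.set k c).getD j 0 = if j = k then c else v.getD j 0 := by
  by_cases hj : j < v.length
  · rw [List.getD_eq_getElem _ _ (by simpa using hj), List.getElem_set,
        List.getD_eq_getElem _ _ hj]
    by_cases h : j = k
    · simp [h]
    · rw [if_neg (by omega), if_neg h]
  · rw [if_neg (by omega), List.getD_eq_default _ _ (by rw [List.length_set]; omega),
        List.getD_eq_default _ _ (by omega)]

theorem foldl_length {α : Type} (l : List α) (step : List Int → α → List Int)
    (hstep : ∀ v t, (step v t).length = v.length) :
    ∀ v : List Int, (l.foldl step v).length = v.length := by
  induction l with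
  | nil => intro v; rfl
  | cons t l ih => intro v; rw [List.foldl_cons, ih, hstep]

theorem any_ofList (tokens : List String) (p : String → Bool) :
    (PySem.Set.ofList tokens).any p = tokens.any p := by
  rw [Bool.eq_iff_iff]
  simp only [List.any_eq_true, PySem.Set.mem_ofList]

-- bag membership for the bernoulli table: dict.fromkeys(tokens, 1)
theorem get?_foldl_insert_one (l : List String) :
    ∀ (d : PySem.Dict String Int) (t : String),
      (l.foldl (fun d t => d.insert t 1) d).get? t =
        if t ∈ l then some 1 else d.get? t := by
  induction l with
  | nil => intro d t; simp
  | cons s l ih =>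
    intro d t
    rw [List.foldl_cons, ih, PySem.Dict.get?_insert]
    by_cases h : t ∈ l
    · simp [h]
    · by_cases hs : t = s <;> simp [h, hs]

theorem get?_pvFromKeys1 (tokens : List String) (t : String) :
    (pvFromKeys1 tokens).get? t = if t ∈ tokens then some 1 else none := by
  unfold pvFromKeys1
  rw [get?_foldl_insert_one, PySem.Dict.get?_empty]

-- the counter's lookup, unpacked
theorem get?_counter_char (tokens : List String) (t : String) (c : Int)
    (h : (PySem.Dict.counter tokens).get? t = some c) :
    t ∈ tokens ∧ c = (tokens.count t : Int) := by
  have hm : t ∈ tokens := by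
    have hc := PySem.Dict.contains_counter tokens t
    rw [PySem.Dict.contains_eq_isSome_get?, h] at hc
    simpa using hc.symm
  have hd := PySem.Dict.getD_counter tokens t
  rw [PySem.Dict.getD_eq_get?_getD, h] at hd
  exact ⟨hm, by simpa using hd⟩

-- with unique keys, a vocab entry IS the dict lookup of its token
theorem pvGetIdx_of_mem (vocab : List (String × Int)) (t : String) (i : Int)
    (hnd : (vocab.map Prod.fst).Nodup) (hm : (t, i) ∈ vocab) :
    pvGetIdx vocab t = some i :=
  PySem.Dict.get?_of_mem_items (PySem.Dict.mk vocab) hm hnd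

theorem pvGetIdx_mem (vocab : List (String × Int)) (t : String) (i : Int)
    (h : pvGetIdx vocab t = some i) : (t, i) ∈ vocab :=
  PySem.Dict.mem_items_of_get?_eq_some (PySem.Dict.mk vocab) h

-- pointwise value of the "vector[idx] = 1" loop (A's bernoulli loop)
theorem bern_point (vocab : List (String × Int)) (l : List String) (j : Nat) :
    ∀ v : List Int, v.length = vocab.length →
    (∀ t ∈ l, pvInRangeTok vocab t = true) →
    (l.foldl (fun v t =>
        match pvGetIdx vocab t with
        | some idx => PySem.List.pySetD v idx 1
        | none => v) v).getD j 0
      = if l.any (pvHit vocab j) then 1 else v.getD j 0 := by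
  induction l with
  | nil => intro v hv hin; simp
  | cons t l ih =>
    intro v hv hin
    have hr := hin t (by simp)
    simp only [List.foldl_cons, List.any_cons]
    cases hg : pvGetIdx vocab t with
    | none =>
      rw [show (match (none : Option Int) with
        | some idx => PySem.List.pySetD v idx 1
        | none => v) = v from rfl]
      rw [ih v hv (fun s hs => hin s (by simp [hs]))]
      simp [pvHit, hg]
    | some i =>
      have hb : -(v.length : Int) ≤ i ∧ i < v.length := by
        unfold pvInRangeTok at hr; rw [hg] at hr; simp at hr; omega
      have heff : pvEffN vocab.length i < v.length := by
        rw [hv]; exact pvEffN_lt _ _ (by omega) (by omega)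
      rw [show (match (some i : Option Int) with
        | some idx => PySem.List.pySetD v idx 1
        | none => v) = v.set (pvEffN vocab.length i) 1 by
          show PySem.List.pySetD v i 1 = _
          rw [pySetD_eff _ _ _ hb.1 hb.2, hv]]
      rw [ih _ (by rw [List.length_set, hv]) (fun s hs => hin s (by simp [hs]))]
      rw [getD_set_int _ _ _ _ heff]
      by_cases ha : l.any (pvHit vocab j) <;> by_cases he : pvEffN vocab.length i = j <;>
        simp [ha, he, pvHit, hg] <;> try (intro h; exact absurd h.symm he)

-- pointwise value of A's "vector[idx] = count" loop over the distinct tokens: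
-- with no column collisions, the unique hitting token's count (or the initial value)
theorem bowA_point (vocab : List (String × Int)) (tokens : List String)
    (l : List String) (j : Nat) :
    ∀ v : List Int, v.length = vocab.length →
    (∀ t ∈ l, pvInRangeTok vocab t = true) →
    (∀ t1 ∈ l, ∀ t2 ∈ l, t1 ≠ t2 → pvCollide vocab t1 t2 = false) →
    l.Nodup →
    (l.foldl (fun v t =>
        match pvGetIdx vocab t with
        | some idx => PySem.List.pySetD v idx ((tokens.count t : Int))
        | none => v) v).getD j 0
      = match l.find? (pvHit vocab j) with
        | some t => (tokens.count t : Int)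
        | none => v.getD j 0 := by
  induction l with
  | nil => intro v hv hin hinj hnd; simp
  | cons t l ih =>
    intro v hv hin hinj hnd
    have hr := hin t (by simp)
    simp only [List.foldl_cons, List.find?_cons]
    cases hg : pvGetIdx vocab t with
    | none =>
      rw [show (match (none : Option Int) with
        | some idx => PySem.List.pySetD v idx ((tokens.count t : Int))
        | none => v) = v from rfl]
      rw [ih v hv (fun s hs => hin s (by simp [hs]))
        (fun a ha b hb hab => hinj a (by simp [ha]) b (by simp [hb]) hab)
        (List.Nodup.of_cons hnd)]
      have : pvHit vocab j t = false := by simp [pvHit, hg]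
      rw [this]
    | some i =>
      have hb : -(v.length : Int) ≤ i ∧ i < v.length := by
        unfold pvInRangeTok at hr; rw [hg] at hr; simp at hr; omega
      have heff : pvEffN vocab.length i < v.length := by
        rw [hv]; exact pvEffN_lt _ _ (by omega) (by omega)
      rw [show (match (some i : Option Int) with
        | some idx => PySem.List.pySetD v idx ((tokens.count t : Int))
        | none => v) = v.set (pvEffN vocab.length i) ((tokens.count t : Int)) by
          show PySem.List.pySetD v i _ = _
          rw [pySetD_eff _ _ _ hb.1 hb.2, hv]]
      rw [ih _ (by rw [List.length_set, hv]) (fun s hs => hin s (by simp [hs]))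
        (fun a ha b hb hab => hinj a (by simp [ha]) b (by simp [hb]) hab)
        (List.Nodup.of_cons hnd)]
      by_cases he : pvEffN vocab.length i = j
      · -- t hits column j: by no-collision, nothing in l hits j
        have hnone : l.find? (pvHit vocab j) = none := by
          rw [List.find?_eq_none]
          intro s hs hhit
          have hst : t ≠ s := by
            intro h; rw [← h] at hs; exact (List.nodup_cons.mp hnd).1 hs
          have := hinj t (by simp) s (by simp [hs]) hst
          unfold pvHit at hhit
          unfold pvCollide at this
          rw [hg] at this
          cases hg2 : pvGetIdx vocab s with
          | none => rw [hg2] at hhit; simp at hhit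
          | some i2 =>
            rw [hg2] at hhit this
            simp at hhit this
            omega
        rw [hnone, getD_set_int _ _ _ _ heff, if_pos he.symm]
        have ht : pvHit vocab j t = true := by simp [pvHit, hg, he]
        rw [ht]
      · have hf0 : pvHit vocab j t = false := by simp [pvHit, hg]; omega
        rw [hf0]
        simp only []
        cases hf : l.find? (pvHit vocab j) with
        | some s => rfl
        | none => rw [getD_set_int _ _ _ _ heff, if_neg (fun h => he h.symm)]

-- pointwise value of B's vocabulary loop: the first hitting entry's bag value
-- (valid when all hitting entries carry the same bag value, so last-write = first-write)
theorem altB_point (bag : PySem.Dict String Int) (n j : Nat) (es : List (String × Int)) :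
    ∀ v : List Int, v.length = n →
    (∀ ti ∈ es, (bag.get? ti.1).isSome = true → (-(n : Int) ≤ ti.2 ∧ ti.2 < n)) →
    (∀ a ∈ es, ∀ b ∈ es, pvHitE bag n j a = true → pvHitE bag n j b = true →
      bag.get? a.1 = bag.get? b.1) →
    (es.foldl (fun v ti =>
        match bag.get? ti.1 with
        | some c => PySem.List.pySetD v ti.2 c
        | none => v) v).getD j 0
      = match es.find? (pvHitE bag n j) with
        | some ti => (bag.get? ti.1).getD 0
        | none => v.getD j 0 := by
  induction es with
  | nil => intro v hv hin heq; simp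
  | cons ti es ih =>
    intro v hv hin heq
    simp only [List.foldl_cons]
    cases hg : bag.get? ti.1 with
    | none =>
      rw [show (match (none : Option Int) with
        | some c => PySem.List.pySetD v ti.2 c
        | none => v) = v from rfl]
      rw [ih v hv (fun s hs h => hin s (by simp [hs]) h)
        (fun a ha b hb => heq a (by simp [ha]) b (by simp [hb]))]
      have hno : ¬ pvHitE bag n j ti = true := by simp [pvHitE, hg]
      rw [List.find?_cons_of_neg (h := hno)]
    | some c =>
      have hb := hin ti (by simp) (by simp [hg])
      have heff : pvEffN n ti.2 < v.length := by
        rw [hv]; exact pvEffN_lt _ _ hb.1 hb.2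
      rw [show (match (some c : Option Int) with
        | some c => PySem.List.pySetD v ti.2 c
        | none => v) = v.set (pvEffN n ti.2) c by
          show PySem.List.pySetD v ti.2 c = _
          rw [pySetD_eff _ _ _ (by omega) (by omega), hv]]
      rw [ih _ (by rw [List.length_set, hv]) (fun s hs h => hin s (by simp [hs]) h)
        (fun a ha b hb => heq a (by simp [ha]) b (by simp [hb]))]
      by_cases he : pvEffN n ti.2 = j
      · have hhit : pvHitE bag n j ti = true := by simp [pvHitE, hg, he]
        rw [List.find?_cons_of_pos (h := hhit)]
        cases hf : es.find? (pvHitE bag n j) with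
        | some tj =>
          have hj : pvHitE bag n j tj = true := List.find?_some hf
          have := heq tj (by simp [List.mem_of_find?_eq_some hf]) ti (by simp) hj hhit
          simp only [this, hg]
        | none =>
          rw [getD_set_int _ _ _ _ heff, if_pos he.symm]
          simp [hg]
      · have hhit : ¬ pvHitE bag n j ti = true := by simp [pvHitE, hg]; omega
        rw [List.find?_cons_of_neg (h := hhit)]
        cases hf : es.find? (pvHitE bag n j) with
        | some tj => rfl
        | none => rw [getD_set_int _ _ _ _ heff, if_neg (fun h => he h.symm)]

-- ===== VERDICT (by name: the statement is the Claim_ definition above) =====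
-- shared facts, instantiating altB_point's hypotheses from Pre_
theorem pv_bounds (vocab : List (String × Int)) (t : String) (i : Int)
    (hg : pvGetIdx vocab t = some i) (hr : pvInRangeTok vocab t = true) :
    -(vocab.length : Int) ≤ i ∧ i < vocab.length := by
  unfold pvInRangeTok at hr; rw [hg] at hr; simp at hr; omega

theorem vectorize_tokens_spec : Claim_equal_vectorize_tokens := by
  intro tokens vocab rep hdom hpre
  obtain ⟨hrep, hnd, hin, hinj⟩ := hpre
  unfold Spec_vectorize_tokens vectorize_tokens vectorize_tokens_alt
  rcases hrep with h | h <;> subst h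
  · -- representation = "bow"
    simp only [String.reduceEq, reduceIte, true_or, if_true]
    rw [PySem.Dict.items_counter, List.foldl_map]
    have hinj' := hinj rfl
    have hstepA : ∀ (v : List Int) (t : String), (match pvGetIdx vocab t with
        | some idx => PySem.List.pySetD v idx ((tokens.count t : Int))
        | none => v).length = v.length := by
      intro v t; cases pvGetIdx vocab t <;> simp [PySem.List.length_pySetD]
    have hstepB : ∀ (v : List Int) (ti : String × Int),
        (match (PySem.Dict.counter tokens).get? ti.1 with
        | some c => PySem.List.pySetD v ti.2 c
        | none => v).length = v.length := by
      intro v ti; cases (PySem.Dict.counter tokens).get? ti.1 <;>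
        simp [PySem.List.length_pySetD]
    apply List.ext_getElem
    · rw [foldl_length _ _ hstepA, foldl_length _ _ hstepB]
    · intro j h1 h2
      rw [← List.getD_eq_getElem _ 0 h1, ← List.getD_eq_getElem _ 0 h2]
      rw [bowA_point vocab tokens (PySem.Set.ofList tokens) j _ (by simp)
            (fun s hs => hin s ((PySem.Set.mem_ofList _ _).mp hs))
            (fun a ha b hb hab => hinj' a ((PySem.Set.mem_ofList _ _).mp ha)
              b ((PySem.Set.mem_ofList _ _).mp hb) hab)
            (PySem.Set.nodup_ofList tokens)]
      rw [altB_point (PySem.Dict.counter tokens) vocab.length j vocab _ (by simp)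
            (by
              intro ti hti hs
              cases hg : (PySem.Dict.counter tokens).get? ti.1 with
              | none => rw [hg] at hs; simp at hs
              | some c =>
                obtain ⟨hmem, -⟩ := get?_counter_char tokens ti.1 c hg
                exact pv_bounds vocab ti.1 ti.2
                  (pvGetIdx_of_mem vocab ti.1 ti.2 hnd hti) (hin ti.1 hmem))
            (by
              intro a ha b hb hha hhb
              by_cases hab : a.1 = b.1
              · rw [hab]
              · exfalso
                unfold pvHitE at hha hhb
                cases hga : (PySem.Dict.counter tokens).get? a.1 with
                | none => rw [hga] at hha; simp at hha
                | some ca =>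
                cases hgb : (PySem.Dict.counter tokens).get? b.1 with
                | none => rw [hgb] at hhb; simp at hhb
                | some cb =>
                  rw [hga] at hha; rw [hgb] at hhb
                  simp at hha hhb
                  obtain ⟨hma, -⟩ := get?_counter_char tokens a.1 ca hga
                  obtain ⟨hmb, -⟩ := get?_counter_char tokens b.1 cb hgb
                  have hcol := hinj' a.1 hma b.1 hmb hab
                  unfold pvCollide at hcol
                  rw [pvGetIdx_of_mem vocab a.1 a.2 hnd ha,
                      pvGetIdx_of_mem vocab b.1 b.2 hnd hb] at hcol
                  simp at hcol
                  omega)]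
      cases hfb : vocab.find? (pvHitE (PySem.Dict.counter tokens) vocab.length j) with
      | some ti =>
        have hj := List.find?_some hfb
        have hmemv := List.mem_of_find?_eq_some hfb
        unfold pvHitE at hj
        cases hg : (PySem.Dict.counter tokens).get? ti.1 with
        | none => rw [hg] at hj; simp at hj
        | some c =>
          rw [hg] at hj; simp at hj
          obtain ⟨hmem, hc⟩ := get?_counter_char tokens ti.1 c hg
          have hhit : pvHit vocab j ti.1 = true := by
            unfold pvHit
            rw [pvGetIdx_of_mem vocab ti.1 ti.2 hnd hmemv]
            simp [hj]
          cases hfa : (PySem.Set.ofList tokens).find? (pvHit vocab j) with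
          | none =>
            exact absurd hhit (by
              simpa using List.find?_eq_none.mp hfa ti.1
                ((PySem.Set.mem_ofList _ _).mpr hmem))
          | some t =>
            have hht := List.find?_some hfa
            have hmt : t ∈ tokens :=
              (PySem.Set.mem_ofList _ _).mp (List.mem_of_find?_eq_some hfa)
            simp only [hg, Option.getD_some, hc]
            by_cases hteq : t = ti.1
            · rw [hteq]
            · exfalso
              have hcol := hinj' t hmt ti.1 hmem hteq
              unfold pvHit at hht hhit
              unfold pvCollide at hcol
              cases hgt : pvGetIdx vocab t with
              | none => rw [hgt] at hht; simp at hht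
              | some it =>
                rw [hgt] at hht hcol
                rw [pvGetIdx_of_mem vocab ti.1 ti.2 hnd hmemv] at hhit hcol
                simp at hht hhit hcol
                omega
      | none =>
        have hfa : (PySem.Set.ofList tokens).find? (pvHit vocab j) = none := by
          rw [List.find?_eq_none]
          intro t htm hht
          have hmt : t ∈ tokens := (PySem.Set.mem_ofList _ _).mp htm
          unfold pvHit at hht
          cases hgt : pvGetIdx vocab t with
          | none => rw [hgt] at hht; simp at hht
          | some it =>
            rw [hgt] at hht; simp at hht
            have hmemv := pvGetIdx_mem vocab t it hgt
            have : pvHitE (PySem.Dict.counter tokens) vocab.length j (t, it) = true := by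
              unfold pvHitE
              have hcon := PySem.Dict.contains_counter tokens t
              rw [PySem.Dict.contains_eq_isSome_get?] at hcon
              simp [hcon, hmt, hht]
            exact absurd this (by simpa using List.find?_eq_none.mp hfb (t, it) hmemv)
        rw [hfa]
  · -- representation = "bernoulli"
    simp only [String.reduceEq, reduceIte, or_true, if_true]
    apply List.ext_getElem
    · rw [foldl_length _ _ (fun v t => by
        cases pvGetIdx vocab t <;> simp [PySem.List.length_pySetD]),
         foldl_length _ _ (fun v (ti : String × Int) => by
        cases (pvFromKeys1 tokens).get? ti.1 <;> simp [PySem.List.length_pySetD])]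
    · intro j h1 h2
      rw [← List.getD_eq_getElem _ 0 h1, ← List.getD_eq_getElem _ 0 h2]
      rw [bern_point vocab (PySem.Set.ofList tokens) j _ (by simp)
            (fun s hs => hin s ((PySem.Set.mem_ofList _ _).mp hs)),
          any_ofList]
      rw [altB_point (pvFromKeys1 tokens) vocab.length j vocab _ (by simp)
            (by
              intro ti hti hs
              rw [get?_pvFromKeys1] at hs
              by_cases hmem : ti.1 ∈ tokens
              · exact pv_bounds vocab ti.1 ti.2
                  (pvGetIdx_of_mem vocab ti.1 ti.2 hnd hti) (hin ti.1 hmem)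
              · rw [if_neg hmem] at hs; simp at hs)
            (by
              intro a ha b hb hha hhb
              unfold pvHitE at hha hhb
              rw [get?_pvFromKeys1] at hha ⊢
              rw [get?_pvFromKeys1] at hhb ⊢
              by_cases hma : a.1 ∈ tokens
              · by_cases hmb : b.1 ∈ tokens
                · rw [if_pos hma, if_pos hmb]
                · rw [if_neg hmb] at hhb; simp at hhb
              · rw [if_neg hma] at hha; simp at hha)]
      cases hfb : vocab.find? (pvHitE (pvFromKeys1 tokens) vocab.length j) with
      | some ti =>
        have hj := List.find?_some hfb
        have hmemv := List.mem_of_find?_eq_some hfb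
        unfold pvHitE at hj
        rw [get?_pvFromKeys1] at hj
        by_cases hmem : ti.1 ∈ tokens
        · rw [if_pos hmem] at hj; simp at hj
          have hany : tokens.any (pvHit vocab j) = true := by
            rw [List.any_eq_true]
            refine ⟨ti.1, hmem, ?_⟩
            unfold pvHit
            rw [pvGetIdx_of_mem vocab ti.1 ti.2 hnd hmemv]
            simp [hj]
          simp [hany, get?_pvFromKeys1, hmem]
        · rw [if_neg hmem] at hj; simp at hj
      | none =>
        have hany : tokens.any (pvHit vocab j) = false := by
          rw [List.any_eq_false]
          intro t hmt hht
          unfold pvHit at hht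
          cases hgt : pvGetIdx vocab t with
          | none => rw [hgt] at hht; simp at hht
          | some it =>
            rw [hgt] at hht; simp at hht
            have hmemv := pvGetIdx_mem vocab t it hgt
            have : pvHitE (pvFromKeys1 tokens) vocab.length j (t, it) = true := by
              unfold pvHitE
              rw [get?_pvFromKeys1]
              simp [hmt, hht]
            exact absurd this (by simpa using List.find?_eq_none.mp hfb (t, it) hmemv)
        rw [hany, if_neg (by simp)]
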